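-- pv_equiv track=rewrite | github.com/BRRRARRGH/Kattis | ProgrammingTeam/TouchscreenKeyboard/touchscreenKeyboard.py | throughKeyboard
-- ===== SOURCE A (Python) =====
-- def throughKeyboard(myKeyboard, myPhraseLetter, newPhraseLetter):
--     originalCharIndexX = 0
--     originalCharIndexY = 0
--     newCharIndexX = 0
--     newCharIndexY = 0
--     for i in range(len(myKeyboard)):
--          for j in range(len(myKeyboard[i])):
--             if (myPhraseLetter == myKeyboard[i][j]):
--                 originalCharIndexX = i
--                 originalCharIndexY = j
--             if (newPhraseLetter == myKeyboard[i][j]):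
--                 newCharIndexX = i
--                 newCharIndexY = j
--
--     return (abs(newCharIndexX - originalCharIndexX) + abs(newCharIndexY - originalCharIndexY))
-- ===== SOURCE B (Python) =====
-- def throughKeyboard(myKeyboard, myPhraseLetter, newPhraseLetter):
--     def locate(ch):
--         # search backwards (bottom row up, rightmost cell first) and stop at the
--         # first hit, which is exactly the LAST occurrence in row-major order
--         for i in range(len(myKeyboard) - 1, -1, -1):
--             row = myKeyboard[i]
--             for j in range(len(row) - 1, -1, -1):
--                 if row[j] == ch:
--                     return i, j
--         return 0, 0
--     x1, y1 = locate(myPhraseLetter)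
--     x2, y2 = locate(newPhraseLetter)
--     return abs(x2 - x1) + abs(y2 - y1)
-- ===== Notes on version B (the rewrite author's own statement) =====
-- stated objective: alternative
-- what changed: Instead of one exhaustive forward sweep that keeps overwriting four counters, B runs two independent backward searches (bottom-right to top-left) that early-return at the first hit, which is the last row-major occurrence A ends up with; absent letters fall through to (0,0).
import Mathlib
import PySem

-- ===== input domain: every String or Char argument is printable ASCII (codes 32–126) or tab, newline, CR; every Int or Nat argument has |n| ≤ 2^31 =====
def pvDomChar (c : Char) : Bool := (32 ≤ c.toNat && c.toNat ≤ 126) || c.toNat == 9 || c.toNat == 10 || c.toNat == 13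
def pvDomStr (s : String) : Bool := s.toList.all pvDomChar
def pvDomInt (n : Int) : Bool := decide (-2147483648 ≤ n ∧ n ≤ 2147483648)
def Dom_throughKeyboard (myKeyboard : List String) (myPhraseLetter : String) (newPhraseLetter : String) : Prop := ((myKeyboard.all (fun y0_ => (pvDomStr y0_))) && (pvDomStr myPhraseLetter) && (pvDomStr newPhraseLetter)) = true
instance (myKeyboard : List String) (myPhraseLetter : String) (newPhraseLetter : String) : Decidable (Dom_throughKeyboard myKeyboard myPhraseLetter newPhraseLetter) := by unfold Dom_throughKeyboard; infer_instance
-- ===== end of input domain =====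

-- B replaces A's exhaustive forward sweep (four overwritten counters) by two independent
-- backward searches with early exit (the first backward hit is A's last row-major match),
-- defaulting to (0,0) for absent letters; objective: alternative decomposition.


-- ===== PORT A =====
-- the body of A's inner loop: the two if-branches, in A's order (s[j] in Python is the
-- one-character string, hence the String key in x.1)
def pvStepA (p q : String) (st : Int × Int × Int × Int) (x : String × Int × Int) :
    Int × Int × Int × Int :=
  let st := if p == x.1 then (x.2.1, x.2.2, st.2.2) else st
  if q == x.1 then (st.1, st.2.1, x.2.1, x.2.2) else st

def throughKeyboard (myKeyboard : List String) (myPhraseLetter : String) (newPhraseLetter : String) : Int :=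
  let st :=
    (PySem.List.enumerate myKeyboard).foldl
      (fun st ir =>
        (PySem.List.enumerate ir.2.toList).foldl
          (fun st jc => pvStepA myPhraseLetter newPhraseLetter st (String.mk [jc.2], ir.1, jc.1))
          st)
      ((0, 0, 0, 0) : Int × Int × Int × Int)
  |st.2.2.1 - st.1| + |st.2.2.2 - st.2.1|

-- ===== PORT B =====
-- the inner backward loop of locate: scan one row's cells right-to-left, early return
def pvLocInRow (ch : String) (i : Int) : List (Int × Char) → Option (Int × Int)
  | [] => none
  | jc :: rest => if ch == String.mk [jc.2] then some (i, jc.1) else pvLocInRow ch i rest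

-- the outer backward loop of locate: rows bottom-to-top, early return on first hit
def pvLocate (ch : String) : List (Int × String) → Int × Int
  | [] => (0, 0)
  | ir :: rest =>
    match pvLocInRow ch ir.1 ((PySem.List.enumerate ir.2.toList).reverse) with
    | some p => p
    | none => pvLocate ch rest

def throughKeyboard_alt (myKeyboard : List String) (myPhraseLetter : String) (newPhraseLetter : String) : Int :=
  let a := pvLocate myPhraseLetter ((PySem.List.enumerate myKeyboard).reverse)
  let b := pvLocate newPhraseLetter ((PySem.List.enumerate myKeyboard).reverse)
  |b.1 - a.1| + |b.2 - a.2|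

-- ===== PRECONDITION & SPEC =====
def Spec_throughKeyboard (myKeyboard : List String) (myPhraseLetter : String) (newPhraseLetter : String) (out : Int) : Prop := out = throughKeyboard_alt myKeyboard myPhraseLetter newPhraseLetter
instance (myKeyboard : List String) (myPhraseLetter : String) (newPhraseLetter : String) (out : Int) : Decidable (Spec_throughKeyboard myKeyboard myPhraseLetter newPhraseLetter out) := by unfold Spec_throughKeyboard; infer_instance

-- ===== CLAIM =====
def Claim_equal_throughKeyboard : Prop := ∀ (myKeyboard : List String) (myPhraseLetter : String) (newPhraseLetter : String), Dom_throughKeyboard myKeyboard myPhraseLetter newPhraseLetter → Spec_throughKeyboard myKeyboard myPhraseLetter newPhraseLetter (throughKeyboard myKeyboard myPhraseLetter newPhraseLetter)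

-- ===== LEMMAS AND PROOFS =====

-- "last occurrence wins" update for a single tracked key
def pvUpd (k : String) (s : Int × Int) (x : String × Int × Int) : Int × Int :=
  if k == x.1 then (x.2.1, x.2.2) else s

-- first match of key k in a stream of (key, position) cells
def pvFirst (k : String) : List (String × Int × Int) → Option (Int × Int)
  | [] => none
  | x :: rest => if k == x.1 then some x.2 else pvFirst k rest

-- the flattened row-major stream of (one-char string, (i, j)) cells
def pvFlat (kb : List String) : List (String × Int × Int) :=
  (PySem.List.enumerate kb).flatMap
    (fun ir => (PySem.List.enumerate ir.2.toList).map (fun jc => (String.mk [jc.2], ir.1, jc.1)))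

-- any nested fold over the two enumerates is the fold over the flattened stream
theorem pvFoldFlat {σ : Type} (kb : List String) (f : σ → String × Int × Int → σ) (s : σ) :
    (PySem.List.enumerate kb).foldl
      (fun s ir => (PySem.List.enumerate ir.2.toList).foldl
        (fun s jc => f s (String.mk [jc.2], ir.1, jc.1)) s) s
    = (pvFlat kb).foldl f s := by
  unfold pvFlat
  generalize PySem.List.enumerate kb = L
  induction L generalizing s with
  | nil => rfl
  | cons x xs ih =>
    simp only [List.foldl_cons, List.flatMap_cons, List.foldl_append, List.foldl_map, ih]

-- A's combined 4-tuple fold is the pair of the two independent pvUpd folds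
theorem pvSplit (p q : String) (L : List (String × Int × Int)) (s : Int × Int × Int × Int) :
    L.foldl (pvStepA p q) s
      = ((L.foldl (pvUpd p) (s.1, s.2.1)).1, (L.foldl (pvUpd p) (s.1, s.2.1)).2,
         (L.foldl (pvUpd q) (s.2.2.1, s.2.2.2)).1, (L.foldl (pvUpd q) (s.2.2.1, s.2.2.2)).2) := by
  induction L generalizing s with
  | nil => rfl
  | cons x xs ih =>
    obtain ⟨a, b, c, d⟩ := s
    simp only [List.foldl_cons, ih, pvStepA, pvUpd]
    split_ifs <;> rfl

theorem pvFirst_append (k : String) (L M : List (String × Int × Int)) :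
    pvFirst k (L ++ M) = ((pvFirst k L).rec (pvFirst k M) (fun v => some v) : Option (Int × Int)) := by
  induction L with
  | nil => rfl
  | cons x xs ih =>
    simp only [List.cons_append, pvFirst]
    split_ifs <;> simp [ih]

-- the "overwrite" fold equals the first match of the reversed stream
theorem pvFoldRev (k : String) (L : List (String × Int × Int)) (s : Int × Int) :
    L.foldl (pvUpd k) s = (pvFirst k L.reverse).getD s := by
  induction L generalizing s with
  | nil => rfl
  | cons x xs ih =>
    simp only [List.foldl_cons, ih, List.reverse_cons, pvFirst_append, pvFirst, pvUpd]
    cases h : pvFirst k xs.reverse <;> split_ifs <;> simp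

-- the inner backward loop is pvFirst over the mapped cells
theorem pvLocInRow_eq (ch : String) (i : Int) (l : List (Int × Char)) :
    pvLocInRow ch i l = pvFirst ch (l.map (fun jc => (String.mk [jc.2], i, jc.1))) := by
  induction l with
  | nil => rfl
  | cons x xs ih => simp only [pvLocInRow, List.map_cons, pvFirst, ih]

-- the outer backward loop is pvFirst over the flattened reversed stream, with (0,0) default
theorem pvLocate_eq (ch : String) (R : List (Int × String)) :
    pvLocate ch R
      = (pvFirst ch (R.flatMap
          (fun ir => ((PySem.List.enumerate ir.2.toList).map
                        (fun jc => (String.mk [jc.2], ir.1, jc.1))).reverse))).getD (0, 0) := by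
  induction R with
  | nil => rfl
  | cons x xs ih =>
    simp only [pvLocate, List.flatMap_cons, pvFirst_append, pvLocInRow_eq, List.map_reverse, ih]
    cases h : pvFirst ch (((PySem.List.enumerate x.2.toList).map
        (fun jc => (String.mk [jc.2], x.1, jc.1))).reverse) <;> simp

-- ===== VERDICT =====
theorem throughKeyboard_spec : Claim_equal_throughKeyboard := by
  intro kb p q _
  unfold Spec_throughKeyboard throughKeyboard throughKeyboard_alt
  dsimp only
  rw [pvFoldFlat kb (pvStepA p q), pvSplit p q (pvFlat kb) (0, 0, 0, 0)]
  rw [pvLocate_eq, pvLocate_eq, pvFoldRev, pvFoldRev]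
  rw [show (pvFlat kb).reverse
        = (PySem.List.enumerate kb).reverse.flatMap
            (fun ir => ((PySem.List.enumerate ir.2.toList).map
                          (fun jc => (String.mk [jc.2], ir.1, jc.1))).reverse) from by
      simp [pvFlat, List.reverse_flatMap, Function.comp_def]]
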